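-- pv_equiv track=rewrite | github.com/acast83/hackaton_tyrolean_tourism_data | backend/src/scripts/create_microservice/utils.py | prepare_for_template
-- ===== SOURCE A (Python) =====
-- def prepare_for_template(code_string,
--                          var_name,
--                          del_placeholder,
--                          indent: int = 0,
--                          template_sep: int = 2):
--     code_string = '\n'.join([' ' * indent + x if i != 0 else x
--                              for i, x in enumerate(code_string.split('\n'))])
--     return (del_placeholder
--             + code_string
--             + '\n' * template_sep
--             + f'{" " * indent}# {{{{ {var_name} }}}}{{# TEMPLATE PLACEHOLDER. DO NOT DELETE #}}')
-- ===== SOURCE B (Python) =====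
-- def prepare_for_template(code_string,
--                          var_name,
--                          del_placeholder,
--                          indent: int = 0,
--                          template_sep: int = 2):
--     pad = ' ' * indent
--     out = [del_placeholder]
--     for ch in code_string:
--         out.append(ch)
--         if ch == '\n':
--             out.append(pad)
--     out.append('\n' * template_sep)
--     out.append(pad + '# {{ ' + var_name + ' }}{# TEMPLATE PLACEHOLDER. DO NOT DELETE #}')
--     return ''.join(out)
-- ===== Notes on version B (the rewrite author's own statement) =====
-- stated objective: alternative
-- what changed: Replaces A's split-on-newline / enumerate / conditional-prefix / join pipeline with a single character scan that appends each char to an accumulator and emits the indentation pad right after every newline, then joins once.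
import Mathlib
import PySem

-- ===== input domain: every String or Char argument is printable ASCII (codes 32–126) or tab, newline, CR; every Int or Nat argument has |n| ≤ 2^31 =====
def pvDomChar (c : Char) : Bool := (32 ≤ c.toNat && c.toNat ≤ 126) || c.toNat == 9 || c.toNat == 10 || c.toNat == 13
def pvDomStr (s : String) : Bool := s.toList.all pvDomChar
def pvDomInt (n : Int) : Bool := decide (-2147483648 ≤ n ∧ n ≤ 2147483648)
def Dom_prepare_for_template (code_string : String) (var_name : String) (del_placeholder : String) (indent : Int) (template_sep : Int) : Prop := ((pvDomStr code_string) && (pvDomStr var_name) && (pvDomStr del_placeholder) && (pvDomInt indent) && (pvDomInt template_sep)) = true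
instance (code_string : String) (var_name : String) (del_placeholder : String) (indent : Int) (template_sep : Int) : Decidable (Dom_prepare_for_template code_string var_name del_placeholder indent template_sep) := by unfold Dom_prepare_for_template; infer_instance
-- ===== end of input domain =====

-- B replaces A's split/enumerate/join pipeline with one character scan that emits the pad after each newline; objective: alternative decomposition.

-- ===== PORT A =====
-- A: split on '\n', indent every line but the first via enumerate, re-join, then append separators and placeholder.
def prepare_for_template (code_string : String) (var_name : String) (del_placeholder : String) (indent : Int) (template_sep : Int) : String :=
  let parts := PySem.Chars.splitOn code_string.toList ['\n']
  let code2 := PySem.Chars.join ['\n']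
    ((PySem.List.enumerate parts).map (fun p => if p.1 ≠ 0 then PySem.List.pyRepeat [' '] indent ++ p.2 else p.2))
  String.ofList (del_placeholder.toList ++ code2
    ++ PySem.List.pyRepeat ['\n'] template_sep
    ++ PySem.List.pyRepeat [' '] indent
    ++ "# {{ ".toList ++ var_name.toList ++ " }}{# TEMPLATE PLACEHOLDER. DO NOT DELETE #}".toList)

-- ===== PORT B =====
-- B: one left-to-right scan over the characters with an accumulator seeded with del_placeholder;
-- each char is appended and the pad is appended right after every '\n'; then the suffix pieces.
def prepare_for_template_alt (code_string : String) (var_name : String) (del_placeholder : String) (indent : Int) (template_sep : Int) : String :=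
  let pad := PySem.List.pyRepeat [' '] indent
  let out := code_string.toList.foldl
    (fun acc ch => if ch = '\n' then acc ++ [ch] ++ pad else acc ++ [ch])
    del_placeholder.toList
  String.ofList (out
    ++ PySem.List.pyRepeat ['\n'] template_sep
    ++ (pad ++ "# {{ ".toList ++ var_name.toList ++ " }}{# TEMPLATE PLACEHOLDER. DO NOT DELETE #}".toList))

-- ===== PRECONDITION & SPEC =====
def Spec_prepare_for_template (code_string : String) (var_name : String) (del_placeholder : String) (indent : Int) (template_sep : Int) (out : String) : Prop := out = prepare_for_template_alt code_string var_name del_placeholder indent template_sep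
instance (code_string : String) (var_name : String) (del_placeholder : String) (indent : Int) (template_sep : Int) (out : String) : Decidable (Spec_prepare_for_template code_string var_name del_placeholder indent template_sep out) := by unfold Spec_prepare_for_template; infer_instance

-- ===== CLAIM =====
def Claim_equal_prepare_for_template : Prop := ∀ (code_string : String) (var_name : String) (del_placeholder : String) (indent : Int) (template_sep : Int), Dom_prepare_for_template code_string var_name del_placeholder indent template_sep → Spec_prepare_for_template code_string var_name del_placeholder indent template_sep (prepare_for_template code_string var_name del_placeholder indent template_sep)

-- ===== LEMMAS AND PROOFS =====

-- structural reference version of split on ['\n']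
def pvSplit : List Char → List (List Char)
  | [] => [[]]
  | c :: t => if c = '\n' then [] :: pvSplit t
              else (c :: (pvSplit t).headI) :: (pvSplit t).tail

-- reference version of "insert `new` after each newline" (newline kept, `new` = '\n'::pad there)
def pvRep (new : List Char) : List Char → List Char
  | [] => []
  | c :: t => if c = '\n' then new ++ pvRep new t else c :: pvRep new t

-- the joined, all-but-first-indented result in closed form
def pvJoin (pad : List Char) : List (List Char) → List Char
  | [] => []
  | h :: t => h ++ (t.map (fun x => '\n' :: (pad ++ x))).flatten

theorem pvSplit_ne_nil (l : List Char) : pvSplit l ≠ [] := by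
  cases l with
  | nil => simp [pvSplit]
  | cons c t => simp only [pvSplit]; split_ifs <;> simp

theorem pvSplit_head_tail (l : List Char) :
    pvSplit l = (pvSplit l).headI :: (pvSplit l).tail := by
  cases l with
  | nil => rfl
  | cons c t => simp only [pvSplit]; split_ifs <;> rfl

theorem splitOn_go_spec (l : List Char) : ∀ (fuel : Nat) (cur : List Char)
    (acc : List (List Char)), l.length ≤ fuel →
    PySem.Chars.splitOn.go ['\n'] fuel l cur acc
      = acc.reverse ++ (cur.reverse ++ (pvSplit l).headI) :: (pvSplit l).tail := by
  induction l with
  | nil =>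
    intro fuel cur acc _
    cases fuel <;> simp [PySem.Chars.splitOn.go, pvSplit]
  | cons c t ih =>
    intro fuel cur acc hf
    cases fuel with
    | zero => simp at hf
    | succ f =>
      by_cases hc : c = '\n'
      · subst hc
        have hpre : List.isPrefixOf ['\n'] ('\n' :: t) = true := by
          simp [List.isPrefixOf]
        simp only [PySem.Chars.splitOn.go, hpre, if_true, List.length_cons,
          List.length_nil, List.drop_succ_cons, List.drop_zero] at *
        rw [ih f [] (cur.reverse :: acc) (by omega)]
        cases hps : pvSplit t with
        | nil => exact absurd hps (pvSplit_ne_nil t)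
        | cons a as => simp [pvSplit, hps]
      · have hpre : List.isPrefixOf ['\n'] (c :: t) = false := by
          simp only [List.isPrefixOf, Bool.and_eq_false_iff]
          simp [Ne.symm hc]
        simp only [PySem.Chars.splitOn.go, hpre, Bool.false_eq_true, if_false]
        rw [ih f (c :: cur) acc (by simp at hf; omega)]
        simp [pvSplit, hc]

theorem splitOn_eq_pvSplit (l : List Char) :
    PySem.Chars.splitOn l ['\n'] = pvSplit l := by
  unfold PySem.Chars.splitOn
  rw [splitOn_go_spec l (l.length + 1) [] [] (by omega)]
  simpa using (pvSplit_head_tail l).symm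

theorem enumerate_map_pos (pad : List Char) (t : List (List Char)) :
    ∀ n : Int, 0 < n →
    (PySem.List.enumerate t n).map (fun p => if p.1 ≠ 0 then pad ++ p.2 else p.2)
      = t.map (fun x => pad ++ x) := by
  induction t with
  | nil => intro n _; rfl
  | cons h r ih =>
    intro n hn
    simp only [PySem.List.enumerate, List.map_cons]
    rw [ih (n + 1) (by omega)]
    simp [show n ≠ 0 by omega]

theorem intercalate_cons₂ (s a b : List Char) (r : List (List Char)) :
    List.intercalate s (a :: b :: r) = a ++ s ++ List.intercalate s (b :: r) := by
  simp [List.intercalate, List.intersperse]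

theorem intercalate_newline (pad : List Char) (t : List (List Char)) :
    ∀ h : List Char, List.intercalate ['\n'] (h :: t.map (fun x => pad ++ x))
      = pvJoin pad (h :: t) := by
  induction t with
  | nil => intro h; simp [List.intercalate, pvJoin]
  | cons b r ih =>
    intro h
    simp only [List.map_cons, intercalate_cons₂]
    rw [ih (pad ++ b)]
    simp [pvJoin, List.append_assoc]

theorem pvJoin_pvSplit (pad : List Char) (l : List Char) :
    pvJoin pad (pvSplit l) = pvRep ('\n' :: pad) l := by
  induction l with
  | nil => rfl
  | cons c t ih =>
    by_cases hc : c = '\n'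
    · subst hc
      simp only [pvSplit, if_true, pvRep]
      rw [pvSplit_head_tail t] at ih ⊢
      simp only [pvJoin, List.map_cons, List.flatten_cons, List.nil_append] at *
      rw [← ih]
      simp [List.append_assoc]
    · simp only [pvSplit, hc, if_false, pvRep]
      rw [pvSplit_head_tail t] at ih
      simp only [pvJoin] at *
      rw [List.cons_append, ← ih]

-- A's joined body in terms of pvRep
theorem bodyA_eq (cs : List Char) (pad : List Char) :
    PySem.Chars.join ['\n']
      ((PySem.List.enumerate (PySem.Chars.splitOn cs ['\n'])).map
        (fun p => if p.1 ≠ 0 then pad ++ p.2 else p.2))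
      = pvRep ('\n' :: pad) cs := by
  rw [splitOn_eq_pvSplit]
  rw [pvSplit_head_tail cs]
  have hz : PySem.List.enumerate ((pvSplit cs).headI :: (pvSplit cs).tail) 0
      = ((0 : Int), (pvSplit cs).headI) :: PySem.List.enumerate (pvSplit cs).tail 1 := by
    simp [PySem.List.enumerate]
  rw [hz]
  have hm : ((((0 : Int), (pvSplit cs).headI) :: PySem.List.enumerate (pvSplit cs).tail 1).map
      (fun p => if p.1 ≠ 0 then pad ++ p.2 else p.2))
      = (pvSplit cs).headI :: (pvSplit cs).tail.map (fun x => pad ++ x) := by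
    rw [List.map_cons, enumerate_map_pos pad (pvSplit cs).tail 1 (by omega)]
    simp
  rw [hm]
  show List.intercalate ['\n'] _ = _
  rw [intercalate_newline pad (pvSplit cs).tail (pvSplit cs).headI]
  have := pvJoin_pvSplit pad cs
  rw [pvSplit_head_tail cs] at this
  rw [this]

-- B's scan in terms of pvRep
theorem foldB_eq (pad : List Char) (l : List Char) : ∀ acc : List Char,
    l.foldl (fun acc ch => if ch = '\n' then acc ++ [ch] ++ pad else acc ++ [ch]) acc
      = acc ++ pvRep ('\n' :: pad) l := by
  induction l with
  | nil => intro acc; simp [pvRep]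
  | cons c t ih =>
    intro acc
    by_cases hc : c = '\n'
    · subst hc
      simp only [List.foldl_cons, if_true, pvRep]
      rw [ih]
      simp [List.append_assoc]
    · simp only [List.foldl_cons, hc, if_false, pvRep]
      rw [ih]
      simp [hc]

-- ===== VERDICT =====
theorem prepare_for_template_spec : Claim_equal_prepare_for_template := by
  intro cs vn dp indent sep _
  show _ = _
  simp only [prepare_for_template, prepare_for_template_alt,
    bodyA_eq cs.toList (PySem.List.pyRepeat [' '] indent),
    foldB_eq (PySem.List.pyRepeat [' '] indent) cs.toList dp.toList]
  simp [List.append_assoc]
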